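-- pv_equiv track=rewrite | github.com/kvtoraman/Screenplay | html_list_parser.py | is_scene_changer
-- ===== SOURCE A (Python) =====
-- def is_scene_changer(line):  #detect scene changer lines
--     sc_list = [
--         "EXT.", "INT.", "EXT ", "INT ", "INT:", "EXT:", "DECK ", "ROOM",
--         "ELEVATOR", "ON THE ", "SLAM TO", "INT/EXT", "I/E.", "TITLE",
--         'TRANSITION TO', 'LATER', 'NIGHT', 'THAT', 'APARTMENT', 'CUT TO',
--         'INTERCUT', 'SCENE', 'SFX OVER', 'VFX:', 'DISSOLVE '
--     ]
--     for sc in sc_list: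
--         if (sc in line):
--             return True
--
--     return False
-- ===== SOURCE B (Python) =====
-- _SC_MARKERS = (
--     "EXT.", "INT.", "EXT ", "INT ", "INT:", "EXT:", "DECK ", "ROOM",
--     "ELEVATOR", "ON THE ", "SLAM TO", "INT/EXT", "I/E.", "TITLE",
--     'TRANSITION TO', 'LATER', 'NIGHT', 'THAT', 'APARTMENT', 'CUT TO',
--     'INTERCUT', 'SCENE', 'SFX OVER', 'VFX:', 'DISSOLVE '
-- )
--
-- def is_scene_changer(line):
--     # single left-to-right sweep over the positions of the line: at each
--     # position, test whether some marker starts there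
--     for i in range(len(line)):
--         if any(line.startswith(m, i) for m in _SC_MARKERS):
--             return True
--     return False
-- ===== Notes on version B (the rewrite author's own statement) =====
-- stated objective: alternative
-- what changed: A loops over the 25 markers, running a full substring scan of the line for each; B makes one sweep over the positions of the line, testing at each position whether any marker starts there (transposed traversal: position-outer/marker-inner prefix tests instead of marker-outer substring searches).
import Mathlib
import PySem

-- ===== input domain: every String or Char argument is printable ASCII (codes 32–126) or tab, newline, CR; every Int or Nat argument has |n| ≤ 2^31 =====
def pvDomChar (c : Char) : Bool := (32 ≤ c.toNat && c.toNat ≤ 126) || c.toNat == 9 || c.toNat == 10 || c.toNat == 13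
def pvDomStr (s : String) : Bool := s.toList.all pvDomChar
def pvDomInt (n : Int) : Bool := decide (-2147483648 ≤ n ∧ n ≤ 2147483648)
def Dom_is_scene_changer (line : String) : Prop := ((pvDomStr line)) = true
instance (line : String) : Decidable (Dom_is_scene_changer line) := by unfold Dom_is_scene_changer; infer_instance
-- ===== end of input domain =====

-- B replaces A's marker-by-marker substring scans with one sweep over the line's
-- positions, testing at each position whether some marker starts there (alternative).


-- the 25 marker strings both programs use
def scMarkers : List String :=
  ["EXT.", "INT.", "EXT ", "INT ", "INT:", "EXT:", "DECK ", "ROOM",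
   "ELEVATOR", "ON THE ", "SLAM TO", "INT/EXT", "I/E.", "TITLE",
   "TRANSITION TO", "LATER", "NIGHT", "THAT", "APARTMENT", "CUT TO",
   "INTERCUT", "SCENE", "SFX OVER", "VFX:", "DISSOLVE "]

-- ===== PORT A =====
-- 'for sc in sc_list: if sc in line: return True / return False'
def isSceneLoopA (line : String) : List String → Bool
  | [] => false
  | sc :: rest => if PySem.Str.isIn sc line then true else isSceneLoopA line rest

def is_scene_changer (line : String) : Bool := isSceneLoopA line scMarkers

-- ===== PORT B =====
-- 'for i in range(len(line)): if any(line.startswith(m, i) for m in markers): return True'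
-- realised on the list of characters: sweep over the (nonempty) suffixes of the line
def isSceneSweepB : List Char → Bool
  | [] => false
  | c :: cs =>
      if scMarkers.any (fun m => PySem.Chars.startswith (c :: cs) m.toList) then true
      else isSceneSweepB cs

def is_scene_changer_alt (line : String) : Bool := isSceneSweepB line.toList

-- ===== PRECONDITION & SPEC =====
def Spec_is_scene_changer (line : String) (out : Bool) : Prop := out = is_scene_changer_alt line
instance (line : String) (out : Bool) : Decidable (Spec_is_scene_changer line out) := by unfold Spec_is_scene_changer; infer_instance

-- ===== CLAIM (what is proved, stated in full; the proofs are below) =====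
def Claim_equal_is_scene_changer : Prop := ∀ (line : String), Dom_is_scene_changer line → Spec_is_scene_changer line (is_scene_changer line)

-- ===== LEMMAS AND PROOFS =====

theorem loopA_iff (line : String) (ms : List String) :
    isSceneLoopA line ms = true ↔ ∃ m ∈ ms, m.toList <:+: line.toList := by
  induction ms with
  | nil => simp [isSceneLoopA]
  | cons sc rest ih =>
      simp only [isSceneLoopA]
      by_cases h : PySem.Str.isIn sc line = true
      · rw [if_pos h]
        exact iff_of_true rfl ⟨sc, by simp, (PySem.Str.isIn_iff_infix sc line).mp h⟩
      · rw [if_neg h, ih]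
        constructor
        · rintro ⟨m, hm, hi⟩; exact ⟨m, by simp [hm], hi⟩
        · rintro ⟨m, hm, hi⟩
          rcases (List.mem_cons).mp hm with rfl | hmem
          · exact absurd ((PySem.Str.isIn_iff_infix m line).mpr hi) h
          · exact ⟨m, hmem, hi⟩

theorem sweepB_iff (l : List Char) :
    isSceneSweepB l = true ↔
      ∃ m ∈ scMarkers, ∃ c cs, (c :: cs) <:+ l ∧ m.toList <+: (c :: cs) := by
  induction l with
  | nil =>
      simp only [isSceneSweepB, Bool.false_eq_true, false_iff]
      rintro ⟨m, _, c, cs, hsuf, _⟩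
      exact absurd (List.eq_nil_of_suffix_nil hsuf) (by simp)
  | cons c cs ih =>
      simp only [isSceneSweepB]
      by_cases h : scMarkers.any (fun m => PySem.Chars.startswith (c :: cs) m.toList) = true
      · rw [if_pos h]
        rcases List.any_eq_true.mp h with ⟨m, hm, hp⟩
        exact iff_of_true rfl
          ⟨m, hm, c, cs, List.suffix_refl _, (PySem.Chars.startswith_iff _ _).mp hp⟩
      · rw [if_neg h, ih]
        constructor
        · rintro ⟨m, hm, d, ds, hsuf, hp⟩
          exact ⟨m, hm, d, ds, hsuf.trans (List.suffix_cons c cs), hp⟩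
        · rintro ⟨m, hm, d, ds, hsuf, hp⟩
          rcases List.suffix_cons_iff.mp hsuf with heq | hsuf'
          · apply absurd _ h
            refine List.any_eq_true.mpr ⟨m, hm, ?_⟩
            rw [heq] at hp
            exact (PySem.Chars.startswith_iff _ _).mpr hp
          · exact ⟨m, hm, d, ds, hsuf', hp⟩

theorem scMarkers_ne_nil : ∀ m ∈ scMarkers, m.toList ≠ [] := by decide

theorem is_scene_changer_spec : Claim_equal_is_scene_changer := by
  intro line _
  unfold Spec_is_scene_changer is_scene_changer is_scene_changer_alt
  rw [Bool.eq_iff_iff, loopA_iff, sweepB_iff]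
  constructor
  · rintro ⟨m, hm, hinf⟩
    rcases List.infix_iff_prefix_suffix.mp hinf with ⟨t, hpre, hsuf⟩
    match t, hpre with
    | [], hpre =>
        exact absurd (List.prefix_nil.mp hpre) (scMarkers_ne_nil m hm)
    | d :: ds, hpre => exact ⟨m, hm, d, ds, hsuf, hpre⟩
  · rintro ⟨m, hm, d, ds, hsuf, hpre⟩
    exact ⟨m, hm, List.infix_iff_prefix_suffix.mpr ⟨d :: ds, hpre, hsuf⟩⟩
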